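-- pv_equiv track=rewrite | github.com/aneesh-iyer29/codesheetreader | codesheetreader.py | nihilistEncoder
-- ===== SOURCE A (Python) =====
-- def create_nihilist_alphabet(keyword):
--     keyword = keyword.lower().replace('j', 'i')
--     seen = set()
--     keyword_unique = []
--
--     for char in keyword:
--         if char not in seen and char.isalpha():
--             seen.add(char)
--             keyword_unique.append(char)
--
--     alphabet = 'abcdefghiklmnopqrstuvwxyz'
--     for char in alphabet:
--         if char not in seen:
--             keyword_unique.append(char)
--
--     return ''.join(keyword_unique)
--
-- def nihilistEncoder(s, key, pk, bs):
--     b = create_nihilist_alphabet(pk).upper()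
--     s = s.replace(" ", "").replace("'", "").replace(".", "").upper()
--     key = key.upper()
--
--     pk_dict = {b[i]: (i // 5 + 1) * 10 + (i % 5 + 1) for i in range(len(b))}
--
--     encoded = []
--     x = 0
--     for let in s:
--         encoded.append(pk_dict[let] + pk_dict[key[x]])
--         x += 1
--         if x == len(key):
--             x = 0
--
--     y = ""
--     z = 0
--     for i in range(len(encoded)):
--         y += str(encoded[i]) + " "
--         if (i % bs == bs - 1):
--             if bs == 1:
--                 z += 1
--                 if z == 16:
--                     y += "\n\n\n"
--                     z = 0
--             elif bs < 7:
--                 y += "   "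
--                 z += 1
--                 if z == 3:
--                     y += "\n\n\n"
--                     z = 0
--             else:
--                 y += "   "
--                 z += 1
--                 if z == 2:
--                     y += "\n\n\n"
--                     z = 0
--
--     return y
-- ===== SOURCE B (Python) =====
-- def create_nihilist_alphabet(keyword):
--     keyword = keyword.lower().replace('j', 'i')
--     seen = set()
--     keyword_unique = []
--
--     for char in keyword:
--         if char not in seen and char.isalpha():
--             seen.add(char)
--             keyword_unique.append(char)
--
--     alphabet = 'abcdefghiklmnopqrstuvwxyz'
--     for char in alphabet:
--         if char not in seen:
--             keyword_unique.append(char)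
--
--     return ''.join(keyword_unique)
--
-- def nihilistEncoder(s, key, pk, bs):
--     b = create_nihilist_alphabet(pk).upper()
--     s = s.replace(" ", "").replace("'", "").replace(".", "").upper()
--     key = key.upper()
--
--     pk_dict = {b[i]: (i // 5 + 1) * 10 + (i % 5 + 1) for i in range(len(b))}
--
--     kl = len(key)
--     encoded = [pk_dict[c] + pk_dict[key[i % kl]] for i, c in enumerate(s)]
--
--     if bs <= 0:
--         # no block boundary is ever reached for a non-positive block size
--         return ''.join(str(n) + ' ' for n in encoded)
--
--     thresh = 16 if bs == 1 else (3 if bs < 7 else 2)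
--     sep = '' if bs == 1 else '   '
--     pieces = []
--     z = 0
--     rest = encoded
--     while rest:
--         chunk, rest = rest[:bs], rest[bs:]
--         pieces.append(''.join(str(n) + ' ' for n in chunk))
--         if len(chunk) == bs:
--             pieces.append(sep)
--             z += 1
--             if z == thresh:
--                 pieces.append('\n\n\n')
--                 z = 0
--     return ''.join(pieces)
-- ===== Notes on version B (the rewrite author's own statement) =====
-- stated objective: alternative
-- what changed: The encode pass becomes an enumerate-based comprehension with a modular key index instead of A's manual cycling counter, and the formatting pass becomes a chunked traversal that consumes the encoded list in blocks of bs with precomputed separator and newline threshold, instead of A's single indexed loop testing i % bs at every element.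
import Mathlib
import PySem

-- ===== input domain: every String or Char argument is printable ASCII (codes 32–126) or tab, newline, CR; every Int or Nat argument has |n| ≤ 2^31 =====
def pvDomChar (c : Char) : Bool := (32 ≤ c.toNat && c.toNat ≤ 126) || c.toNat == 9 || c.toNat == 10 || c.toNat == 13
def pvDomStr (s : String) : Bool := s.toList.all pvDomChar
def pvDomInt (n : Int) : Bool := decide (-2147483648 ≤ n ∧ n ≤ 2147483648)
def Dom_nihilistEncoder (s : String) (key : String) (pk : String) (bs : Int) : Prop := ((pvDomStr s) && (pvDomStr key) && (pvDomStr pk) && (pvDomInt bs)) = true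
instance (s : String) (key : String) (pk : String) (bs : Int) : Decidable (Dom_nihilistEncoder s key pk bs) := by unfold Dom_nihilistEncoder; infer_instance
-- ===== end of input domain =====

-- B restructures the formatting pass as a chunked traversal (consume the encoded list
-- in blocks of bs) and the encode pass as an enumerate-map with a modular key index,
-- replacing A's per-index loops with running counters; objective: alternative (same cost).

-- ===== PORT A =====
-- helper create_nihilist_alphabet, shared verbatim by both Pythons
def createNihilistAlphabet (keyword : String) : List Char :=
  let kw := PySem.Chars.replace (PySem.Chars.lower keyword.toList) ['j'] ['i']
  let st := kw.foldl
    (fun (st : PySem.Set Char × List Char) ch =>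
      if !(PySem.Set.contains st.1 ch) && PySem.Chars.isalpha ch then
        (PySem.Set.add st.1 ch, st.2 ++ [ch])
      else st)
    (PySem.Set.empty, [])
  "abcdefghiklmnopqrstuvwxyz".toList.foldl
    (fun acc ch => if !(PySem.Set.contains st.1 ch) then acc ++ [ch] else acc) st.2

-- the cleaning line s.replace(" ","").replace("'","").replace(".","").upper(), shared
def pvCleaned (s : String) : List Char :=
  PySem.Chars.upper
    (PySem.Chars.replace (PySem.Chars.replace (PySem.Chars.replace s.toList [' '] []) ['\''] []) ['.'] [])

-- pk_dict = {b[i]: (i//5+1)*10 + (i%5+1) for i in range(len(b))}, shared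
def pvDict (pk : String) : PySem.Dict Char Int :=
  let b := PySem.Chars.upper (createNihilistAlphabet pk)
  (PySem.List.pyRange 0 (PySem.List.len b) 1).foldl
    (fun d i => d.insert (PySem.List.pyGetD b i ' ')
      ((PySem.Int.floordiv i 5 + 1) * 10 + (PySem.Int.mod i 5 + 1)))
    PySem.Dict.empty

-- A's encode-loop body (dict lookups are total getD: Pre_ excludes Python's KeyError/IndexError)
def encStepA (pkd : PySem.Dict Char Int) (k' : List Char) (st : List Int × Int) (c : Char) : List Int × Int :=
  let enc := st.1 ++ [PySem.Dict.getD pkd c 0 + PySem.Dict.getD pkd (PySem.List.pyGetD k' st.2 ' ') 0]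
  let x := st.2 + 1
  (enc, if x = PySem.List.len k' then 0 else x)

-- A's format-loop body
def fmtStepA (bs : Int) (encoded : List Int) (st : List Char × Int) (i : Int) : List Char × Int :=
  let y := st.1 ++ PySem.Int.toChars (PySem.List.pyGetD encoded i 0) ++ [' ']
  if PySem.Int.mod i bs = bs - 1 then
    if bs = 1 then
      let z := st.2 + 1
      if z = 16 then (y ++ "\n\n\n".toList, 0) else (y, z)
    else if bs < 7 then
      let y2 := y ++ "   ".toList
      let z := st.2 + 1
      if z = 3 then (y2 ++ "\n\n\n".toList, 0) else (y2, z)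
    else
      let y2 := y ++ "   ".toList
      let z := st.2 + 1
      if z = 2 then (y2 ++ "\n\n\n".toList, 0) else (y2, z)
  else (y, st.2)

def nihilistEncoder (s : String) (key : String) (pk : String) (bs : Int) : String :=
  let pkd := pvDict pk
  let s' := pvCleaned s
  let k' := PySem.Chars.upper key.toList
  let encoded := (s'.foldl (encStepA pkd k') ([], 0)).1
  String.ofList ((PySem.List.pyRange 0 (PySem.List.len encoded) 1).foldl (fmtStepA bs encoded) ([], 0)).1

-- ===== PORT B =====
-- ''.join(str(n) + ' ' for n in l)
def pvJoinNums (l : List Int) : List Char :=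
  (l.map (fun n => PySem.Int.toChars n ++ [' '])).flatten

-- thresh = 16 if bs == 1 else (3 if bs < 7 else 2)
def threshOf (bs : Int) : Int := if bs = 1 then 16 else if bs < 7 then 3 else 2
-- sep = '' if bs == 1 else '   '
def sepOf (bs : Int) : List Char := if bs = 1 then [] else "   ".toList

-- B's while loop: consume the encoded list in chunks of bs
-- (the bs < 1 guard only makes the recursion total; B only calls it with 1 ≤ bs)
def fmtChunks (bs : Int) (thresh : Int) (sep : List Char) (rest : List Int) (z : Int) : List Char :=
  if h : rest = [] ∨ bs < 1 then []
  else
    let chunk := PySem.List.slice rest none (some bs)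
    let rest' := PySem.List.slice rest (some bs) none
    let piece := pvJoinNums chunk
    if PySem.List.len chunk = bs then
      if z + 1 = thresh then piece ++ sep ++ "\n\n\n".toList ++ fmtChunks bs thresh sep rest' 0
      else piece ++ sep ++ fmtChunks bs thresh sep rest' (z + 1)
    else piece ++ fmtChunks bs thresh sep rest' z
  termination_by rest.length
  decreasing_by
    all_goals
      rw [not_or] at h
      have hd : PySem.List.slice rest (some bs) none = rest.drop bs.toNat :=
        PySem.List.slice_from rest (by omega)
      simp only [rest', hd, List.length_drop]
      have : rest.length ≠ 0 := fun hn => h.1 (List.eq_nil_of_length_eq_zero hn)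
      omega

def nihilistEncoder_alt (s : String) (key : String) (pk : String) (bs : Int) : String :=
  let pkd := pvDict pk
  let s' := pvCleaned s
  let k' := PySem.Chars.upper key.toList
  let kl := PySem.List.len k'
  let encoded := (PySem.List.enumerate s' 0).map
    (fun p => PySem.Dict.getD pkd p.2 0 + PySem.Dict.getD pkd (PySem.List.pyGetD k' (PySem.Int.mod p.1 kl) ' ') 0)
  if bs ≤ 0 then String.ofList (pvJoinNums encoded)
  else String.ofList (fmtChunks bs (threshOf bs) (sepOf bs) encoded 0)

-- ===== PRECONDITION & SPEC =====
-- Pre_ is exactly where Python A returns: every cleaned character of s (and every used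
-- character of key, uppercased) is one of A's 25 Polybius letters (else KeyError),
-- and when there is anything to encode, key is nonempty (else IndexError) and
-- bs ≠ 0 (else ZeroDivisionError in i % bs).
-- pvLetter c says c is one of A's 25 Polybius letters 'A'..'Z' without 'J'
def pvLetter (c : Char) : Bool := (65 ≤ c.toNat && c.toNat ≤ 90) && c ≠ 'J'

def Pre_nihilistEncoder (s : String) (key : String) (pk : String) (bs : Int) : Prop :=
  ((pvCleaned s).all pvLetter = true) ∧
  (pvCleaned s ≠ [] → bs ≠ 0 ∧ key ≠ "") ∧
  (((PySem.Chars.upper key.toList).take (pvCleaned s).length).all pvLetter = true)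
instance (s : String) (key : String) (pk : String) (bs : Int) : Decidable (Pre_nihilistEncoder s key pk bs) := by
  unfold Pre_nihilistEncoder; infer_instance

def pvWitness_nihilistEncoder : String × String × String × Int := ("HELLO", "KEY", "SECRET", 5)

def Spec_nihilistEncoder (s : String) (key : String) (pk : String) (bs : Int) (out : String) : Prop := out = nihilistEncoder_alt s key pk bs
instance (s : String) (key : String) (pk : String) (bs : Int) (out : String) : Decidable (Spec_nihilistEncoder s key pk bs out) := by unfold Spec_nihilistEncoder; infer_instance

-- ===== CLAIM (what is proved, stated in full; the proofs are below) =====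
def Claim_equal_nihilistEncoder : Prop := ∀ (s : String) (key : String) (pk : String) (bs : Int), Dom_nihilistEncoder s key pk bs → Pre_nihilistEncoder s key pk bs → Spec_nihilistEncoder s key pk bs (nihilistEncoder s key pk bs)

-- ===== LEMMAS AND PROOFS =====

-- (n+1) % b in terms of n % b
theorem pv_emod_succ (n b : Int) : (n + 1) % b = (n % b + 1) % b := by
  conv_lhs => rw [← Int.emod_add_mul_ediv n b, add_right_comm, Int.add_mul_emod_self_left]

-- A's x-update is the cyclic successor
theorem pv_cycle (n kl : Int) (h : 0 < kl) :
    (if n % kl + 1 = kl then (0 : Int) else n % kl + 1) = (n + 1) % kl := by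
  have h0 : 0 ≤ n % kl := Int.emod_nonneg n (by omega)
  have h1 : n % kl < kl := Int.emod_lt_of_pos n h
  rw [pv_emod_succ]
  split_ifs with hh
  · rw [hh, Int.emod_self]
  · exact (Int.emod_eq_of_lt (by omega) (by omega)).symm

-- ---- encode pass ----
theorem pv_enc_eq (pkd : PySem.Dict Char Int) (k' : List Char)
    (hkl : 0 < PySem.List.len k') :
    ∀ (t : List Char) (n : Int) (acc : List Int), 0 ≤ n →
    (t.foldl (encStepA pkd k') (acc, PySem.Int.mod n (PySem.List.len k'))).1
      = acc ++ (PySem.List.enumerate t n).map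
          (fun p => PySem.Dict.getD pkd p.2 0 +
            PySem.Dict.getD pkd (PySem.List.pyGetD k' (PySem.Int.mod p.1 (PySem.List.len k')) ' ') 0) := by
  intro t
  induction t with
  | nil => intro n acc hn; simp [PySem.List.enumerate_nil]
  | cons c t ih =>
    intro n acc hn
    rw [List.foldl_cons]
    have hstep : encStepA pkd k' (acc, PySem.Int.mod n (PySem.List.len k')) c
        = (acc ++ [PySem.Dict.getD pkd c 0 +
            PySem.Dict.getD pkd (PySem.List.pyGetD k' (PySem.Int.mod n (PySem.List.len k')) ' ') 0],
           PySem.Int.mod (n + 1) (PySem.List.len k')) := by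
      simp only [encStepA, Prod.mk.injEq, true_and]
      rw [PySem.Int.mod_eq_emod_of_pos hkl, PySem.Int.mod_eq_emod_of_pos hkl]
      exact pv_cycle n _ hkl
    rw [hstep, ih (n + 1) _ (by omega), PySem.List.enumerate_cons]
    simp

-- ---- format pass: fmtR, a structural restatement of A's indexed loop ----
def stepE (bs : Int) (e : Int) (i : Int) (st : List Char × Int) : List Char × Int :=
  let y := st.1 ++ PySem.Int.toChars e ++ [' ']
  if PySem.Int.mod i bs = bs - 1 then
    if bs = 1 then
      let z := st.2 + 1
      if z = 16 then (y ++ "\n\n\n".toList, 0) else (y, z)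
    else if bs < 7 then
      let y2 := y ++ "   ".toList
      let z := st.2 + 1
      if z = 3 then (y2 ++ "\n\n\n".toList, 0) else (y2, z)
    else
      let y2 := y ++ "   ".toList
      let z := st.2 + 1
      if z = 2 then (y2 ++ "\n\n\n".toList, 0) else (y2, z)
  else (y, st.2)

def fmtR (bs : Int) : List Int → Int → (List Char × Int) → (List Char × Int)
  | [], _, st => st
  | e :: l, i, st => fmtR bs l (i + 1) (stepE bs e i st)

theorem pv_bridge (bs : Int) :
    ∀ (l pre : List Int) (st : List Char × Int),
    (PySem.List.pyRange (pre.length : Int) ((pre.length : Int) + (l.length : Int)) 1).foldl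
        (fmtStepA bs (pre ++ l)) st = fmtR bs l (pre.length : Int) st := by
  intro l
  induction l with
  | nil =>
    intro pre st
    rw [show ((pre.length : Int) + ((List.length ([] : List Int)) : Int)) = (pre.length : Int) by simp]
    rw [PySem.List.pyRange_one_eq_nil (le_refl _)]
    rfl
  | cons e l ih =>
    intro pre st
    have hlt : (pre.length : Int) < (pre.length : Int) + (((e :: l).length : Int)) := by
      have : 0 < (e :: l).length := by simp
      omega
    rw [PySem.List.pyRange_one_cons hlt, List.foldl_cons]
    have hget : PySem.List.pyGetD (pre ++ e :: l) ((pre.length : Int)) 0 = e := by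
      rw [PySem.List.pyGetD_natCast]
      simp [List.getD, List.getElem?_append_right]
    have hstep : fmtStepA bs (pre ++ e :: l) st ((pre.length : Int)) = stepE bs e ((pre.length : Int)) st := by
      simp only [fmtStepA, stepE, hget]
    rw [hstep]
    have hih := ih (pre ++ [e]) (stepE bs e ((pre.length : Int)) st)
    simp only [List.length_append, List.length_singleton, List.append_assoc,
      List.singleton_append, List.length_cons] at hih ⊢
    rw [show fmtR bs (e :: l) ((pre.length : Int)) st
        = fmtR bs l ((pre.length : Int) + 1) (stepE bs e ((pre.length : Int)) st) from rfl]
    rw [show ((pre.length : Int) + ((l.length : Nat) + 1 : Nat)) = (((pre.length + 1 : Nat) : Int) + (l.length : Int)) by push_cast; ring] 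
    rw [show ((pre.length : Int) + 1) = ((pre.length + 1 : Nat) : Int) by push_cast; ring]
    exact hih

theorem pv_stepE_split (bs e i : Int) (y : List Char) (z : Int) :
    stepE bs e i (y, z) = (y ++ (stepE bs e i ([], z)).1, (stepE bs e i ([], z)).2) := by
  simp only [stepE]
  split_ifs <;> simp

theorem pv_fmtR_split (bs : Int) :
    ∀ (l : List Int) (i : Int) (y : List Char) (z : Int),
    fmtR bs l i (y, z) = (y ++ (fmtR bs l i ([], z)).1, (fmtR bs l i ([], z)).2) := by
  intro l
  induction l with
  | nil => intro i y z; simp [fmtR]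
  | cons e l ih =>
    intro i y z
    rcases hst : stepE bs e i ([], z) with ⟨a, b⟩
    have h1 : stepE bs e i (y, z) = (y ++ a, b) := by rw [pv_stepE_split, hst]
    show fmtR bs l (i + 1) (stepE bs e i (y, z))
        = (y ++ (fmtR bs l (i + 1) (stepE bs e i ([], z))).1,
           (fmtR bs l (i + 1) (stepE bs e i ([], z))).2)
    rw [h1, hst, ih, ih (i + 1) a b]
    simp

theorem pv_fmtR_congr (bs : Int) (hbs : 0 < bs) :
    ∀ (l : List Int) (i j : Int) (st : List Char × Int), i % bs = j % bs →
    fmtR bs l i st = fmtR bs l j st := by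
  intro l
  induction l with
  | nil => intro i j st h; rfl
  | cons e l ih =>
    intro i j st h
    show fmtR bs l (i + 1) (stepE bs e i st) = fmtR bs l (j + 1) (stepE bs e j st)
    have hstep : stepE bs e i st = stepE bs e j st := by
      simp only [stepE, PySem.Int.mod_eq_emod_of_pos hbs, h]
    rw [hstep]
    exact ih (i + 1) (j + 1) _ (by rw [pv_emod_succ i bs, pv_emod_succ j bs, h])

theorem pv_joinNums_append (l₁ l₂ : List Int) :
    pvJoinNums (l₁ ++ l₂) = pvJoinNums l₁ ++ pvJoinNums l₂ := by
  simp [pvJoinNums]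

theorem pv_fmtR_noB (bs : Int) :
    ∀ (l : List Int) (i : Int) (y : List Char) (z : Int),
    (∀ j : Nat, j < l.length → PySem.Int.mod (i + j) bs ≠ bs - 1) →
    fmtR bs l i (y, z) = (y ++ pvJoinNums l, z) := by
  intro l
  induction l with
  | nil => intro i y z h; simp [fmtR, pvJoinNums]
  | cons e l ih =>
    intro i y z h
    have h0 : PySem.Int.mod i bs ≠ bs - 1 := by
      have := h 0 (by simp)
      simpa using this
    show fmtR bs l (i + 1) (stepE bs e i (y, z)) = _
    have hstep : stepE bs e i (y, z) = (y ++ PySem.Int.toChars e ++ [' '], z) := by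
      simp only [stepE]; rw [if_neg h0]
    rw [hstep, ih (i + 1) _ z (by
      intro j hj
      have := h (j + 1) (by simpa using Nat.succ_lt_succ hj)
      simpa [add_assoc, add_comm, add_left_comm] using this)]
    simp [pvJoinNums, List.append_assoc]

theorem pv_fmtR_append (bs : Int) :
    ∀ (l₁ l₂ : List Int) (i : Int) (st : List Char × Int),
    fmtR bs (l₁ ++ l₂) i st = fmtR bs l₂ (i + (l₁.length : Int)) (fmtR bs l₁ i st) := by
  intro l₁
  induction l₁ with
  | nil => intro l₂ i st; simp [fmtR]
  | cons e l₁ ih =>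
    intro l₂ i st
    show fmtR bs (l₁ ++ l₂) (i + 1) (stepE bs e i st) = _
    rw [ih]
    show _ = fmtR bs l₂ (i + (((l₁.length : Nat) + 1 : Nat) : Int)) (fmtR bs l₁ (i + 1) (stepE bs e i st))
    congr 1
    push_cast; ring

theorem pv_stepE_boundary (bs e i : Int) (y : List Char) (z : Int) (hbs : 0 < bs)
    (hcond : PySem.Int.mod i bs = bs - 1) :
    stepE bs e i (y, z) =
      (y ++ PySem.Int.toChars e ++ [' '] ++ sepOf bs ++ (if z + 1 = threshOf bs then "\n\n\n".toList else []),
       if z + 1 = threshOf bs then 0 else z + 1) := by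
  simp only [stepE, if_pos hcond]
  by_cases h1 : bs = 1
  · subst h1
    simp only [sepOf, threshOf, if_pos rfl]
    split_ifs <;> simp
  · by_cases h7 : bs < 7 <;>
      · simp only [sepOf, threshOf, if_neg h1, h7, if_pos]
        split_ifs <;> simp [List.append_assoc]

theorem pv_mod_small (bs j : Int) (hbs : 0 < bs) (h0 : 0 ≤ j) (h1 : j < bs) :
    PySem.Int.mod j bs = j := by
  rw [PySem.Int.mod_eq_emod_of_pos hbs]; exact Int.emod_eq_of_lt h0 h1

theorem pv_fmtR_chunk (bs : Int) (hbs : 0 < bs) (c : List Int) (hc : c.length = bs.toNat)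
    (y : List Char) (z : Int) :
    fmtR bs c 0 (y, z) =
      (y ++ pvJoinNums c ++ sepOf bs ++ (if z + 1 = threshOf bs then "\n\n\n".toList else []),
       if z + 1 = threshOf bs then 0 else z + 1) := by
  have hne : c ≠ [] := by
    intro h; subst h; simp only [List.length_nil] at hc; omega
  rcases (List.eq_nil_or_concat c).resolve_left hne with ⟨c', e, rfl⟩
  rw [List.concat_eq_append] at hc ⊢
  have hc' : c'.length = bs.toNat - 1 := by
    simp only [List.length_append, List.length_cons, List.length_nil] at hc; omega
  rw [pv_fmtR_append]
  rw [pv_fmtR_noB bs c' 0 y z (by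
    intro j hj
    rw [show ((0 : Int) + (j : Int)) = (j : Int) by ring]
    rw [pv_mod_small bs j hbs (by omega) (by omega)]
    omega)]
  have hlen : ((0 : Int) + (c'.length : Int)) = bs - 1 := by omega
  rw [hlen]
  show stepE bs e (bs - 1) (y ++ pvJoinNums c', z) = _
  rw [pv_stepE_boundary bs e (bs - 1) _ z hbs (pv_mod_small bs (bs - 1) hbs (by omega) (by omega))]
  rw [pv_joinNums_append]
  simp [pvJoinNums, List.append_assoc]

theorem pv_fmtR_chunks (bs : Int) (hbs : 0 < bs) :
    ∀ (N : Nat) (l : List Int) (z : Int), l.length ≤ N →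
    (fmtR bs l 0 ([], z)).1 = fmtChunks bs (threshOf bs) (sepOf bs) l z := by
  intro N
  induction N with
  | zero =>
    intro l z hlen
    have : l = [] := List.eq_nil_of_length_eq_zero (by omega)
    subst this
    rw [fmtChunks.eq_def]; simp [fmtR]
  | succ N ih =>
    intro l z hlen
    by_cases hl : l = []
    · subst hl; rw [fmtChunks.eq_def]; simp [fmtR]
    · have hbs1 : ¬ bs < 1 := by omega
      have hto : PySem.List.slice l none (some bs) = l.take bs.toNat :=
        PySem.List.slice_to l (le_of_lt hbs)
      have hfrom : PySem.List.slice l (some bs) none = l.drop bs.toNat :=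
        PySem.List.slice_from l (le_of_lt hbs)
      by_cases hge : bs.toNat ≤ l.length
      · have hc : (l.take bs.toNat).length = bs.toNat := by
          rw [List.length_take]; omega
        conv_lhs => rw [← List.take_append_drop bs.toNat l]
        rw [pv_fmtR_append, pv_fmtR_chunk bs hbs _ hc]
        have hmod : ((0 : Int) + ((l.take bs.toNat).length : Int)) % bs = (0 : Int) % bs := by
          have h1 : (((l.take bs.toNat).length : Nat) : Int) = bs := by omega
          rw [h1]; simp
        rw [pv_fmtR_congr bs hbs _ _ 0 _ hmod, pv_fmtR_split]
        have hr : (l.drop bs.toNat).length ≤ N := by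
          rw [List.length_drop]; omega
        conv_rhs => rw [fmtChunks.eq_def]
        rw [dif_neg (by simp [hl]; omega)]
        simp only [hto, hfrom]
        rw [PySem.List.len_eq, hc]
        rw [if_pos (show ((bs.toNat : Nat) : Int) = bs by omega)]
        by_cases hz : z + 1 = threshOf bs
        · simp only [if_pos hz]
          rw [ih _ 0 hr]
          simp [List.append_assoc]
        · simp only [if_neg hz]
          rw [ih _ (z + 1) hr]
          simp [List.append_assoc]
      · have hlt : l.length < bs.toNat := by omega
        rw [pv_fmtR_noB bs l 0 [] z (by
          intro j hj
          rw [show ((0 : Int) + (j : Int)) = (j : Int) by ring]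
          rw [pv_mod_small bs j hbs (by omega) (by omega)]
          omega)]
        conv_rhs => rw [fmtChunks.eq_def]
        rw [dif_neg (by simp [hl]; omega)]
        simp only [hto, hfrom]
        rw [List.take_of_length_le (le_of_lt hlt), List.drop_eq_nil_of_le (le_of_lt hlt)]
        rw [PySem.List.len_eq]
        rw [if_neg (show ¬ ((l.length : Nat) : Int) = bs by omega)]
        rw [fmtChunks.eq_def]; simp [pvJoinNums]

theorem pv_fmtR_neg (bs : Int) (hbs : bs < 0) (l : List Int) (i : Int)
    (y : List Char) (z : Int) :
    fmtR bs l i (y, z) = (y ++ pvJoinNums l, z) := by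
  apply pv_fmtR_noB
  intro j hj
  have := PySem.Int.mod_neg_bounds (a := i + j) hbs
  omega

-- ===== VERDICT (by name: the statement is the Claim_ definition above) =====
theorem pv_len_upper (cs : List Char) : (PySem.Chars.upper cs).length = cs.length := by
  simp [PySem.Chars.upper]

theorem nihilistEncoder_spec : Claim_equal_nihilistEncoder := by
  intro s key pk bs _hdom hpre
  unfold Spec_nihilistEncoder nihilistEncoder nihilistEncoder_alt
  dsimp only
  obtain ⟨-, hne, -⟩ := hpre
  by_cases hs : pvCleaned s = []
  · rw [hs]
    have hfc : fmtChunks bs (threshOf bs) (sepOf bs) [] 0 = [] := by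
      rw [fmtChunks.eq_def]; simp
    simp only [List.foldl_nil, PySem.List.enumerate_nil, List.map_nil]
    rw [show PySem.List.len ([] : List Int) = 0 from rfl]
    rw [PySem.List.pyRange_one_eq_nil (le_refl _)]
    split_ifs <;> simp [hfc, pvJoinNums]
  · obtain ⟨hbs0, hkey⟩ := hne hs
    have hkl : 0 < PySem.List.len (PySem.Chars.upper key.toList) := by
      have h1 : key.toList ≠ [] := by
        simp only [ne_eq, String.toList_eq_nil_iff]; exact hkey
      rw [PySem.List.len_eq, pv_len_upper]
      have := List.length_pos_iff.mpr h1
      omega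
    have hmod0 : PySem.Int.mod 0 (PySem.List.len (PySem.Chars.upper key.toList)) = 0 := by
      rw [PySem.Int.mod_eq_emod_of_pos hkl]; exact Int.zero_emod _
    have henc := pv_enc_eq (pvDict pk) (PySem.Chars.upper key.toList) hkl (pvCleaned s) 0 [] (le_refl _)
    rw [hmod0] at henc
    rw [List.nil_append] at henc
    rw [henc]
    have hbridge := pv_bridge bs ((PySem.List.enumerate (pvCleaned s) 0).map
      (fun p => PySem.Dict.getD (pvDict pk) p.2 0 +
        PySem.Dict.getD (pvDict pk)
          (PySem.List.pyGetD (PySem.Chars.upper key.toList)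
            (PySem.Int.mod p.1 (PySem.List.len (PySem.Chars.upper key.toList))) ' ') 0)) [] (([], 0))
    simp only [List.length_nil, Nat.cast_zero, List.nil_append, zero_add] at hbridge
    rw [show PySem.List.len ((PySem.List.enumerate (pvCleaned s) 0).map
      (fun p => PySem.Dict.getD (pvDict pk) p.2 0 +
        PySem.Dict.getD (pvDict pk)
          (PySem.List.pyGetD (PySem.Chars.upper key.toList)
            (PySem.Int.mod p.1 (PySem.List.len (PySem.Chars.upper key.toList))) ' ') 0))
      = (((PySem.List.enumerate (pvCleaned s) 0).map
      (fun p => PySem.Dict.getD (pvDict pk) p.2 0 +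
        PySem.Dict.getD (pvDict pk)
          (PySem.List.pyGetD (PySem.Chars.upper key.toList)
            (PySem.Int.mod p.1 (PySem.List.len (PySem.Chars.upper key.toList))) ' ') 0)).length : Int)
      from PySem.List.len_eq _]
    rw [hbridge]
    by_cases hble : bs ≤ 0
    · have hneg : bs < 0 := lt_of_le_of_ne hble hbs0
      rw [if_pos hble, pv_fmtR_neg bs hneg _ 0]
      simp
    · have hbs : 0 < bs := by omega
      rw [if_neg hble]
      rw [pv_fmtR_chunks bs hbs _ _ _ (le_refl _)]
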